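-- pv_equiv track=rewrite | github.com/PGTWO-1/algorithm | py的各种算法/Hiring problem.py | hire_assistant
-- ===== SOURCE A (Python) =====
-- def hire_assistant(n, c, List):
--     best = 0
--     cost = c
--     for i in range(n):
--         if List[i] > best:
--             cost += c
--             best = List[i]
--     return cost
-- ===== SOURCE B (Python) =====
-- def hire_assistant(n, c, List):
--     # build the running-maximum table first, then count strict increases in a second pass
--     runs = [0]
--     for i in range(n):
--         runs.append(max(runs[-1], List[i]))
--     count = sum(1 for a, b in zip(runs, runs[1:]) if b > a)
--     return c * (1 + count)
-- ===== Notes on version B (the rewrite author's own statement) =====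
-- stated objective: alternative
-- what changed: B builds the prefix-maximum table in a first pass and then counts strict increases between adjacent entries in a separate pass, returning c*(1+count), instead of A's single fused loop that mutates best and accumulates cost.
import Mathlib
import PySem

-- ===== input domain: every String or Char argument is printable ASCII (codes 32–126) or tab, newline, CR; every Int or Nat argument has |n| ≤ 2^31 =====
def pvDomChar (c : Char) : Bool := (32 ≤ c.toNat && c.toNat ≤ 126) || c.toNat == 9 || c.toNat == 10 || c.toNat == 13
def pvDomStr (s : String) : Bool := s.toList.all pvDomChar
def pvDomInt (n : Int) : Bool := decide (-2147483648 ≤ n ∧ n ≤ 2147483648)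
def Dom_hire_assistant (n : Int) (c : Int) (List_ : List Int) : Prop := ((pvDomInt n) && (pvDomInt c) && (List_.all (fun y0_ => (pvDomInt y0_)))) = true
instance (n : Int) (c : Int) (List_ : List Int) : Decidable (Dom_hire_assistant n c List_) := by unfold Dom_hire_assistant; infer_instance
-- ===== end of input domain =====

-- B builds the prefix-maximum table first, then counts strict increases in a second pass (alternative decomposition, same cost).

-- ===== PORT A =====
-- Python A: best = 0; cost = c; for i in range(n): if List[i] > best: cost += c; best = List[i]; return cost
-- List[i] is in range for every i of range(n) under Pre_; the getD 0 is never reached there.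
def hire_assistant (n : Int) (c : Int) (List_ : List Int) : Int :=
  ((PySem.List.pyRange 0 n 1).foldl
    (fun (s : Int × Int) i =>
      if (PySem.List.pyGet? List_ i).getD 0 > s.1
      then ((PySem.List.pyGet? List_ i).getD 0, s.2 + c) else s)
    (0, c)).2

-- ===== PORT B =====
-- runs = [0]; for i in range(n): runs.append(max(runs[-1], List[i]))
-- buildRuns b elems produces the runs table starting from b (runs[-1] is the carried b).
def buildRuns (b : Int) : List Int → List Int
  | [] => [b]
  | x :: t => b :: buildRuns (max b x) t

def hire_assistant_alt (n : Int) (c : Int) (List_ : List Int) : Int :=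
  let elems := (PySem.List.pyRange 0 n 1).map (fun i => (PySem.List.pyGet? List_ i).getD 0)
  let runs := buildRuns 0 elems
  let count := (runs.zip runs.tail).countP (fun p => decide (p.2 > p.1))
  c * (1 + (count : Int))

-- ===== PRECONDITION & SPEC =====
-- Pre_ excludes exactly the inputs where A raises IndexError: n larger than the list length.
def Pre_hire_assistant (n : Int) (c : Int) (List_ : List Int) : Prop := n ≤ (List_.length : Int)
instance (n : Int) (c : Int) (List_ : List Int) : Decidable (Pre_hire_assistant n c List_) := by unfold Pre_hire_assistant; infer_instance
def pvWitness_hire_assistant : Int × Int × List Int := (2, 5, [1, 2])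

def Spec_hire_assistant (n : Int) (c : Int) (List_ : List Int) (out : Int) : Prop := out = hire_assistant_alt n c List_
instance (n : Int) (c : Int) (List_ : List Int) (out : Int) : Decidable (Spec_hire_assistant n c List_ out) := by unfold Spec_hire_assistant; infer_instance

-- ===== CLAIM (what is proved, stated in full; the proofs are below) =====
def Claim_equal_hire_assistant : Prop := ∀ (n : Int) (c : Int) (List_ : List Int), Dom_hire_assistant n c List_ → Pre_hire_assistant n c List_ → Spec_hire_assistant n c List_ (hire_assistant n c List_)

-- ===== LEMMAS AND PROOFS =====

-- A's fused fold equals cost + c * (number of strict increases along B's runs table)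
theorem hire_fold_count (c : Int) (l : List Int) (b cost : Int) :
    (l.foldl (fun (s : Int × Int) x => if x > s.1 then (x, s.2 + c) else s) (b, cost)).2
      = cost + c * (((buildRuns b l).zip (buildRuns b l).tail).countP
          (fun p => decide (p.2 > p.1)) : Int) := by
  induction l generalizing b cost with
  | nil => simp [buildRuns]
  | cons x t ih =>
    have hhead : ∀ b' : Int, ∃ y ys, buildRuns b' t = y :: ys ∧ y = b' := by
      intro b'; cases t <;> exact ⟨_, _, rfl, rfl⟩
    obtain ⟨y, ys, hys, hy⟩ := hhead (max b x)
    simp only [List.foldl_cons, buildRuns, hys, List.tail_cons, List.zip_cons_cons,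
      List.countP_cons]
    by_cases h : x > b
    · have hm : max b x = x := by omega
      subst hy
      rw [hm] at hys
      rw [if_pos h, ih, hm, hys]
      simp only [List.tail_cons, decide_eq_true_eq, if_pos h]
      push_cast
      ring
    · have hm : max b x = b := by omega
      subst hy
      rw [hm] at hys
      rw [if_neg h, ih, hm, hys]
      simp only [List.tail_cons, decide_eq_true_eq]
      have hnb : ¬ (b > b) := by omega
      rw [if_neg hnb, Nat.add_zero]

-- ===== VERDICT (by name: the statement is the Claim_ definition above) =====
theorem hire_assistant_spec : Claim_equal_hire_assistant := by
  intro n c List_ _ _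
  show hire_assistant n c List_ = hire_assistant_alt n c List_
  simp only [hire_assistant, hire_assistant_alt]
  rw [← List.foldl_map (f := fun i => (PySem.List.pyGet? List_ i).getD 0)
        (g := fun (s : Int × Int) v => if v > s.1 then (v, s.2 + c) else s)]
  rw [hire_fold_count]
  ring
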